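-- pv_equiv track=rewrite | github.com/nenye-a/insemble-terminal | backend/data/scrape/tests.py | doc_distance
-- ===== SOURCE A (Python) =====
-- def doc_distance(str1, str2):
--     """Quickly determine the document distance between two strings."""
--
--     words1 = dictify(str1.split(' '))
--     words2 = dictify(str2.split(' '))
--
--     all_words = set(list(words1.keys()) + list(words2.keys()))
--
--     distance = 0
--     for word in all_words:
--         distance += abs(words1.get(word, 0) - words2.get(word, 0))
--
--     return distance
--
-- def dictify(list_words):
--     """Turn a list of words into a dictionary of each words to the number of occurances."""
--     my_dict = {}
--     for word in list_words:
--         my_dict[word] = my_dict.get(word, 0) + 1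
--
--     return my_dict
-- ===== SOURCE B (Python) =====
-- def doc_distance(str1, str2):
--     """Document distance: L1 distance of word-frequency vectors (words split on ' ').
--
--     Sort-and-merge: sort both word lists and count unmatched words with a
--     two-pointer sweep; no dictionaries or sets are built.
--     """
--     w1 = sorted(str1.split(' '))
--     w2 = sorted(str2.split(' '))
--     n1, n2 = len(w1), len(w2)
--     i = j = 0
--     distance = 0
--     while i < n1 and j < n2:
--         a, b = w1[i], w2[j]
--         if a == b:
--             i += 1
--             j += 1
--         elif a < b:
--             i += 1
--             distance += 1
--         else:
--             j += 1
--             distance += 1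
--     return distance + (n1 - i) + (n2 - j)
-- ===== Notes on version B (the rewrite author's own statement) =====
-- stated objective: alternative
-- what changed: B replaces A's frequency-dict-plus-union-set-and-abs-loop by sorting the two word lists and counting unmatched words with a two-pointer merge sweep; no dictionary or set is ever built.
import Mathlib
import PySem

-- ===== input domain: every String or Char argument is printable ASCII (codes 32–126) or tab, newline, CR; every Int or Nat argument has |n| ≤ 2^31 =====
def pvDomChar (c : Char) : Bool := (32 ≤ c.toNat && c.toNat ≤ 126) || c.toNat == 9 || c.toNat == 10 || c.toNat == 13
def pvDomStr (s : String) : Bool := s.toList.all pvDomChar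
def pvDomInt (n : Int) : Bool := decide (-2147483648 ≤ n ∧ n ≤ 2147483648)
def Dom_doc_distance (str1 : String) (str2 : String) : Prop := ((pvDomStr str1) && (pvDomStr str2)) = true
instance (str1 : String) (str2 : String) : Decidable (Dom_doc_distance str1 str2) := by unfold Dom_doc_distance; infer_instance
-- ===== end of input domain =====

-- B replaces A's frequency dicts + union set + abs loop by sorting both word lists and
-- counting unmatched words with a two-pointer merge sweep (no dict or set built).

-- split on the literal ' ': the separator is nonempty, so PySem.Str.split? is always `some` and the `.getD []` never fires
def pySplitSpace (s : String) : List String := (PySem.Str.split? s " ").getD []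

-- ===== PORT A =====
def dictify (list_words : List String) : PySem.Dict String Int :=
  list_words.foldl (fun my_dict word => my_dict.insert word (my_dict.getD word 0 + 1)) PySem.Dict.empty

def doc_distance (str1 : String) (str2 : String) : Int :=
  let words1 := dictify (pySplitSpace str1)
  let words2 := dictify (pySplitSpace str2)
  let all_words := PySem.Set.ofList (words1.keys ++ words2.keys)
  all_words.foldl (fun distance word => distance + |words1.getD word 0 - words2.getD word 0|) 0

-- ===== PORT B =====
-- the while loop of Source B: two pointers over the sorted lists, counting unmatched words
-- (the Python advances integer indices i, j over w1, w2; here the same sweep consumes the suffixes)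
def mergeGap : List String → List String → Int
  | [], l2 => (l2.length : Int)
  | _ :: t1, [] => (t1.length : Int) + 1
  | a :: t1, b :: t2 =>
      if a = b then mergeGap t1 t2
      else if a < b then 1 + mergeGap t1 (b :: t2)
      else 1 + mergeGap (a :: t1) t2

def doc_distance_alt (str1 : String) (str2 : String) : Int :=
  let w1 := PySem.List.sorted (pySplitSpace str1) (fun x => x) false
  let w2 := PySem.List.sorted (pySplitSpace str2) (fun x => x) false
  mergeGap w1 w2

-- ===== PRECONDITION & SPEC =====
def Spec_doc_distance (str1 : String) (str2 : String) (out : Int) : Prop := out = doc_distance_alt str1 str2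
instance (str1 : String) (str2 : String) (out : Int) : Decidable (Spec_doc_distance str1 str2 out) := by unfold Spec_doc_distance; infer_instance

-- ===== CLAIM (what is proved, stated in full; the proofs are below) =====
def Claim_equal_doc_distance : Prop := ∀ (str1 : String) (str2 : String), Dom_doc_distance str1 str2 → Spec_doc_distance str1 str2 (doc_distance str1 str2)

-- ===== LEMMAS AND PROOFS =====

-- number of matched words = size of the multiset intersection
def interCard (l1 l2 : List String) : Nat := ((l1 : Multiset String) ∩ (l2 : Multiset String)).card

theorem cons_inter_cons (a : String) (s t : Multiset String) :
    (a ::ₘ s) ∩ (a ::ₘ t) = a ::ₘ (s ∩ t) := by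
  ext x
  by_cases hx : x = a <;> simp [Multiset.count_inter, hx]

theorem cons_inter_of_notMem (a : String) (s t : Multiset String) (h : a ∉ t) :
    (a ::ₘ s) ∩ t = s ∩ t := by
  ext x
  by_cases hx : x = a
  · subst hx; simp [Multiset.count_inter, Multiset.count_eq_zero.mpr h]
  · simp [Multiset.count_inter, hx]

-- the merge sweep on sorted lists computes (total length) − 2·(matched words)
theorem mergeGap_eq (l1 l2 : List String)
    (h1 : l1.Pairwise (· ≤ ·)) (h2 : l2.Pairwise (· ≤ ·)) :
    mergeGap l1 l2 = (l1.length : Int) + l2.length - 2 * interCard l1 l2 := by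
  induction l1, l2 using mergeGap.induct with
  | case1 l2 => simp [mergeGap, interCard]
  | case2 a t1 => simp [mergeGap, interCard]
  | case3 t1 b t2 ih =>
      have hrec := ih (h1.of_cons) (h2.of_cons)
      have hint : interCard (b :: t1) (b :: t2) = interCard t1 t2 + 1 := by
        unfold interCard
        rw [← Multiset.cons_coe, ← Multiset.cons_coe, cons_inter_cons, Multiset.card_cons]
      simp only [mergeGap, hrec, hint, List.length_cons]
      push_cast; ring
  | case4 a t1 b t2 hab hlt ih =>
      have hnotm : a ∉ ((b :: t2 : List String) : Multiset String) := by
        simp only [Multiset.mem_coe, List.mem_cons, not_or]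
        refine ⟨hab, fun h => absurd (lt_of_lt_of_le hlt (List.rel_of_pairwise_cons h2 h)) (lt_irrefl a)⟩
      have hrec := ih (h1.of_cons) h2
      have hint : interCard (a :: t1) (b :: t2) = interCard t1 (b :: t2) := by
        unfold interCard; rw [← Multiset.cons_coe, cons_inter_of_notMem a _ _ hnotm]
      simp only [mergeGap, if_neg hab, if_pos hlt, hrec, hint, List.length_cons]
      push_cast; ring
  | case5 a t1 b t2 hab hnlt ih =>
      have hba : b < a := lt_of_le_of_ne (not_lt.mp hnlt) (fun h => hab h.symm)
      have hnotm : b ∉ ((a :: t1 : List String) : Multiset String) := by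
        simp only [Multiset.mem_coe, List.mem_cons, not_or]
        refine ⟨fun h => hab h.symm,
          fun h => absurd (lt_of_lt_of_le hba (List.rel_of_pairwise_cons h1 h)) (lt_irrefl b)⟩
      have hrec := ih h1 (h2.of_cons)
      have hint : interCard (a :: t1) (b :: t2) = interCard (a :: t1) t2 := by
        unfold interCard
        rw [Multiset.inter_comm, ← Multiset.cons_coe (a := b),
          cons_inter_of_notMem b _ _ hnotm, Multiset.inter_comm]
      simp only [mergeGap, if_neg hab, if_neg hnlt, hrec, hint, List.length_cons]
      push_cast; ring

-- A's sum of |count differences| over all distinct words, in closed form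
theorem sum_abs_eq (l1 l2 : List String) :
    (∑ w ∈ (l1 ++ l2).toFinset, |(l1.count w : Int) - l2.count w|)
      = (l1.length : Int) + l2.length - 2 * interCard l1 l2 := by
  have habs : ∀ a b : Nat, |(a : Int) - b| = (a : Int) + b - 2 * min (a : Nat) b := by
    intro a b; rcases le_total a b with h | h
    · rw [abs_of_nonpos (by omega), min_eq_left h]; push_cast; omega
    · rw [abs_of_nonneg (by omega), min_eq_right h]; push_cast; omega
  have hsub1 : l1.toFinset ⊆ (l1 ++ l2).toFinset := by
    intro x hx; simp only [List.toFinset_append, Finset.mem_union]; exact Or.inl hx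
  have hsub2 : l2.toFinset ⊆ (l1 ++ l2).toFinset := by
    intro x hx; simp only [List.toFinset_append, Finset.mem_union]; exact Or.inr hx
  have hc1 : (∑ w ∈ (l1 ++ l2).toFinset, l1.count w) = l1.length := by
    rw [← List.sum_toFinset_count_eq_length l1]
    exact (Finset.sum_subset hsub1 (by
      intro x _ hx
      exact List.count_eq_zero.mpr (by simpa using hx))).symm
  have hc2 : (∑ w ∈ (l1 ++ l2).toFinset, l2.count w) = l2.length := by
    rw [← List.sum_toFinset_count_eq_length l2]
    exact (Finset.sum_subset hsub2 (by
      intro x _ hx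
      exact List.count_eq_zero.mpr (by simpa using hx))).symm
  have hmin : (∑ w ∈ (l1 ++ l2).toFinset, min (l1.count w) (l2.count w)) = interCard l1 l2 := by
    have hcount : ∀ w, min (l1.count w) (l2.count w)
        = Multiset.count w ((l1 : Multiset String) ∩ l2) := by
      intro w; rw [Multiset.count_inter]; simp
    simp only [hcount, interCard]
    rw [← Multiset.toFinset_sum_count_eq ((l1 : Multiset String) ∩ l2)]
    refine (Finset.sum_subset ?_ ?_).symm
    · intro x hx
      have := Multiset.mem_inter.mp (Multiset.mem_toFinset.mp hx) |>.1
      exact hsub1 (List.mem_toFinset.mpr (by simpa using this))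
    · intro x _ hx
      exact Multiset.count_eq_zero.mpr (by simpa using hx)
  calc (∑ w ∈ (l1 ++ l2).toFinset, |(l1.count w : Int) - l2.count w|)
      = ∑ w ∈ (l1 ++ l2).toFinset,
          ((l1.count w : Int) + l2.count w - 2 * min (l1.count w) (l2.count w)) := by
        exact Finset.sum_congr rfl (fun w _ => habs _ _)
    _ = (l1.length : Int) + l2.length - 2 * interCard l1 l2 := by
        rw [Finset.sum_sub_distrib, Finset.sum_add_distrib, ← Finset.mul_sum]
        rw [← hc1, ← hc2, ← hmin]; push_cast; ring

-- A's union-set foldl equals that Finset sum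
theorem aside_eq (l1 l2 : List String) :
    (PySem.Set.ofList (PySem.Set.ofList l1 ++ PySem.Set.ofList l2)).foldl
        (fun distance word => distance + |(l1.count word : Int) - l2.count word|) 0
      = ∑ w ∈ (l1 ++ l2).toFinset, |(l1.count w : Int) - l2.count w| := by
  rw [PySem.List.foldl_add]
  have hnd := PySem.Set.nodup_ofList (PySem.Set.ofList l1 ++ PySem.Set.ofList l2)
  have hfs : (PySem.Set.ofList (PySem.Set.ofList l1 ++ PySem.Set.ofList l2)).toFinset
      = (l1 ++ l2).toFinset := by
    apply Finset.ext; intro x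
    simp [PySem.Set.mem_ofList]
  rw [← List.sum_toFinset _ hnd, hfs, zero_add]

-- ===== VERDICT (by name: the statement is the Claim_ definition above) =====
theorem doc_distance_spec : Claim_equal_doc_distance := by
  intro str1 str2 _
  unfold Spec_doc_distance doc_distance doc_distance_alt dictify
  set l1 := pySplitSpace str1
  set l2 := pySplitSpace str2
  simp only [PySem.Dict.foldl_insert_getD_add_one_eq_counter, PySem.Dict.keys_counter,
    PySem.Dict.getD_counter]
  rw [aside_eq, sum_abs_eq]
  have hp1 := PySem.List.sorted_pairwise l1 (fun x => x) (κ := String)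
  have hp2 := PySem.List.sorted_pairwise l2 (fun x => x) (κ := String)
  rw [mergeGap_eq _ _ hp1 hp2]
  have e1 : ((PySem.List.sorted l1 (fun x => x) false : List String) : Multiset String) = (l1 : Multiset String) :=
    Multiset.coe_eq_coe.mpr (PySem.List.sorted_perm l1 _ _)
  have e2 : ((PySem.List.sorted l2 (fun x => x) false : List String) : Multiset String) = (l2 : Multiset String) :=
    Multiset.coe_eq_coe.mpr (PySem.List.sorted_perm l2 _ _)
  simp [interCard, e1, e2,
    (PySem.List.sorted_perm l1 (fun x : String => x) false).length_eq,
    (PySem.List.sorted_perm l2 (fun x : String => x) false).length_eq]
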